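-- pv_equiv track=rewrite | github.com/libra202ma/cc150Python | misc/Epic/string_mangler.py | mangler
-- ===== SOURCE A (Python) =====
-- def mangler(s):
--     wordlist = s.split(' ')
--     newstr = []
--     for word in wordlist:
--         for (ci, c) in enumerate(word):
--             if c in ['a', 'e', 'i', 'o', 'u']:
--                 newstr.append(c.upper())
--             elif ci == len(word) - 1:
--                 newstr.append(c.upper())
--             else:
--                 newstr.append(c.lower())
--         newstr.append(' ')
--
--     return ''.join(newstr)[:-1]
-- ===== SOURCE B (Python) =====
-- def mangler(s):
--     n = len(s)
--     out = []
--     for i, c in enumerate(s):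
--         if c == ' ':
--             out.append(c)
--         elif c in 'aeiou':
--             out.append(c.upper())
--         elif i == n - 1 or s[i + 1] == ' ':
--             out.append(c.upper())
--         else:
--             out.append(c.lower())
--     return ''.join(out)
-- ===== Notes on version B (the rewrite author's own statement) =====
-- stated objective: simpler
-- what changed: Replaced space-splitting plus the nested word/char loops and the trailing-sentinel strip with a single boundary-aware scan over the characters that detects word ends by looking at the next character.
import Mathlib
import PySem

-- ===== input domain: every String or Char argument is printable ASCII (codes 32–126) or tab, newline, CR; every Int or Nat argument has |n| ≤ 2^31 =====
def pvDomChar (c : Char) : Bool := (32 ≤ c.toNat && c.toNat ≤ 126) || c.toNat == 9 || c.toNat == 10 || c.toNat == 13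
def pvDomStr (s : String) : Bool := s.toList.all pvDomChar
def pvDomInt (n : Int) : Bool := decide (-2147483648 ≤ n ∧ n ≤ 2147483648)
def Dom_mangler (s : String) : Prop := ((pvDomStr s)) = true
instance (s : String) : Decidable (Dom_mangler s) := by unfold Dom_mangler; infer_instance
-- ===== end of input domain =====

-- B replaces A's space-split-plus-nested-loops with one boundary-aware scan over the characters
-- (word end detected by "next char is a space or end of string"); objective: simpler, no speed claim.

-- ===== PORT A =====
-- A's newstr is a Python list of 1-char strings that is only ''.join-ed; it is ported as the
-- joined char list (exact: each append contributes exactly one character).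
def manglerLoop (s : String) : List Char :=
  let wordlist := PySem.Chars.splitOn s.toList [' ']
  wordlist.foldl (fun acc w =>
    ((PySem.List.enumerate w 0).foldl (fun acc2 p =>
        if p.2 ∈ ['a', 'e', 'i', 'o', 'u'] then acc2 ++ [PySem.Chars.upperChar p.2]
        else if p.1 = (w.length : Int) - 1 then acc2 ++ [PySem.Chars.upperChar p.2]
        else acc2 ++ [PySem.Chars.lowerChar p.2]) acc) ++ [' ']) []

def mangler (s : String) : String :=
  String.ofList (PySem.List.slice (manglerLoop s) none (some (-1)))

-- ===== PORT B =====
def mangler_alt (s : String) : String :=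
  let cs := s.toList
  let n : Int := (cs.length : Int)
  String.ofList ((PySem.List.enumerate cs 0).foldl (fun acc p =>
    if p.2 = ' ' then acc ++ [p.2]
    else if p.2 ∈ ['a', 'e', 'i', 'o', 'u'] then acc ++ [PySem.Chars.upperChar p.2]
    else if p.1 = n - 1 ∨ PySem.List.pyGet? cs (p.1 + 1) = some ' ' then
      acc ++ [PySem.Chars.upperChar p.2]
    else acc ++ [PySem.Chars.lowerChar p.2]) [])

-- ===== PRECONDITION & SPEC =====
def Spec_mangler (s : String) (out : String) : Prop := out = mangler_alt s
instance (s : String) (out : String) : Decidable (Spec_mangler s out) := by unfold Spec_mangler; infer_instance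

-- ===== CLAIM (what is proved, stated in full; the proofs are below) =====
def Claim_equal_mangler : Prop := ∀ (s : String), Dom_mangler s → Spec_mangler s (mangler s)

-- ===== LEMMAS AND PROOFS =====

-- The common specification: transform one char given the following char (none at end of string).
def tfc (c : Char) (next : Option Char) : Char :=
  if c = ' ' then ' '
  else if c ∈ ['a', 'e', 'i', 'o', 'u'] then PySem.Chars.upperChar c
  else if next = none ∨ next = some ' ' then PySem.Chars.upperChar c
  else PySem.Chars.lowerChar c

def gspec : List Char → List Char
  | [] => []
  | c :: t => tfc c t.head? :: gspec t

-- A's per-word transformation, index-free.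
def wordTf : List Char → List Char
  | [] => []
  | c :: t => (if c ∈ ['a', 'e', 'i', 'o', 'u'] then PySem.Chars.upperChar c
               else if t = [] then PySem.Chars.upperChar c
               else PySem.Chars.lowerChar c) :: wordTf t

-- A's per-word loop with a running index s compared against a fixed target.
def wordA : List Char → Int → Int → List Char
  | [], _, _ => []
  | c :: t, s, tgt => (if c ∈ ['a', 'e', 'i', 'o', 'u'] then PySem.Chars.upperChar c
                       else if s = tgt then PySem.Chars.upperChar c
                       else PySem.Chars.lowerChar c) :: wordA t (s + 1) tgt

-- Structural version of str.split(' ').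
def mySplit : List Char → List (List Char)
  | [] => [[]]
  | c :: t =>
    if c = ' ' then [] :: mySplit t
    else match mySplit t with
         | [] => [[c]]
         | w :: ws => (c :: w) :: ws

def consHead (x : List Char) : List (List Char) → List (List Char)
  | [] => [x]
  | w :: ws => (x ++ w) :: ws

theorem mySplit_ne_nil (l : List Char) : mySplit l ≠ [] := by
  cases l with
  | nil => simp [mySplit]
  | cons c t =>
    simp only [mySplit]
    split
    · simp
    · split <;> simp_all

theorem splitOn_go_eq (l : List Char) :
    ∀ (fuel : Nat) (cur : List Char) (acc : List (List Char)), l.length ≤ fuel →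
      PySem.Chars.splitOn.go [' '] fuel l cur acc = acc.reverse ++ consHead cur.reverse (mySplit l) := by
  induction l with
  | nil =>
    intro fuel cur acc _
    cases fuel <;> simp [PySem.Chars.splitOn.go, mySplit, consHead]
  | cons c t ih =>
    intro fuel cur acc hfuel
    cases fuel with
    | zero => simp at hfuel
    | succ fuel =>
      by_cases hc : c = ' '
      · subst hc
        rw [show PySem.Chars.splitOn.go [' '] (fuel + 1) (' ' :: t) cur acc
              = PySem.Chars.splitOn.go [' '] fuel t [] (cur.reverse :: acc) by
            simp [PySem.Chars.splitOn.go, List.isPrefixOf]]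
        rw [ih fuel [] (cur.reverse :: acc) (by simpa using hfuel)]
        rcases h : mySplit t with _ | ⟨w, ws⟩
        · exact absurd h (mySplit_ne_nil t)
        · simp [mySplit, h, consHead]
      · rw [show PySem.Chars.splitOn.go [' '] (fuel + 1) (c :: t) cur acc
              = PySem.Chars.splitOn.go [' '] fuel t (c :: cur) acc by
            simp [PySem.Chars.splitOn.go, List.isPrefixOf, Ne.symm hc]]
        rw [ih fuel (c :: cur) acc (by simpa using Nat.le_of_succ_le_succ hfuel)]
        rcases h : mySplit t with _ | ⟨w, ws⟩
        · exact absurd h (mySplit_ne_nil t)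
        · simp [mySplit, h, hc, consHead]

theorem splitOn_eq (l : List Char) : PySem.Chars.splitOn l [' '] = mySplit l := by
  rw [PySem.Chars.splitOn, splitOn_go_eq l (l.length + 1) [] [] (by omega)]
  rcases h : mySplit l with _ | ⟨w, ws⟩
  · exact absurd h (mySplit_ne_nil l)
  · simp [consHead]

theorem innerFold_eq (w : List Char) :
    ∀ (s tgt : Int) (acc : List Char),
      (PySem.List.enumerate w s).foldl (fun acc2 p =>
          if p.2 ∈ ['a', 'e', 'i', 'o', 'u'] then acc2 ++ [PySem.Chars.upperChar p.2]
          else if p.1 = tgt then acc2 ++ [PySem.Chars.upperChar p.2]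
          else acc2 ++ [PySem.Chars.lowerChar p.2]) acc = acc ++ wordA w s tgt := by
  induction w with
  | nil => intro s tgt acc; simp [PySem.List.enumerate_nil, wordA]
  | cons c t ih =>
    intro s tgt acc
    rw [PySem.List.enumerate_cons, List.foldl_cons, ih (s + 1) tgt]
    show (if c ∈ ['a', 'e', 'i', 'o', 'u'] then acc ++ [PySem.Chars.upperChar c]
          else if s = tgt then acc ++ [PySem.Chars.upperChar c]
          else acc ++ [PySem.Chars.lowerChar c]) ++ wordA t (s + 1) tgt = acc ++ wordA (c :: t) s tgt
    rw [wordA]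
    split_ifs <;> simp

theorem wordA_eq_wordTf (w : List Char) : ∀ (s : Int), wordA w s (s + w.length - 1) = wordTf w := by
  induction w with
  | nil => intro s; rfl
  | cons c t ih =>
    intro s
    have hlen : (((c :: t).length : Int)) = (t.length : Int) + 1 := by
      push_cast [List.length_cons]; ring
    have htail : wordA t (s + 1) (s + ((c :: t).length : Int) - 1) = wordTf t := by
      have h2 : s + ((c :: t).length : Int) - 1 = (s + 1) + (t.length : Int) - 1 := by
        rw [hlen]; ring
      rw [h2, ih (s + 1)]
    have hiff : (s = s + ((c :: t).length : Int) - 1) ↔ t = [] := by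
      rw [hlen, List.eq_nil_iff_length_eq_zero]; omega
    rw [wordA, wordTf, htail]
    simp only [hiff]

theorem flatMap_mySplit_eq (cs : List Char) :
    (mySplit cs).flatMap (fun w => wordTf w ++ [' ']) = gspec cs ++ [' '] := by
  induction cs with
  | nil => rfl
  | cons c t ih =>
    by_cases hc : c = ' '
    · subst hc
      rw [show mySplit (' ' :: t) = [] :: mySplit t from by simp [mySplit]]
      rw [List.flatMap_cons, ih]
      simp [wordTf, gspec, tfc]
    · rcases hsp : mySplit t with _ | ⟨w, ws⟩
      · exact absurd hsp (mySplit_ne_nil t)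
      · have hw : (w = []) ↔ (t.head? = none ∨ t.head? = some ' ') := by
          rcases t with _ | ⟨d, t'⟩
          · rw [show mySplit ([] : List Char) = [[]] from rfl] at hsp
            injection hsp with h1 _
            simp [← h1]
          · by_cases hd : d = ' '
            · subst hd
              rw [show mySplit (' ' :: t') = [] :: mySplit t' from by simp [mySplit]] at hsp
              injection hsp with h1 _
              simp [← h1]
            · rcases h' : mySplit t' with _ | ⟨w', ws'⟩
              · exact absurd h' (mySplit_ne_nil t')
              · rw [show mySplit (d :: t') = (d :: w') :: ws' from by
                    simp [mySplit, hd, h']] at hsp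
                injection hsp with h1 _
                simp [← h1, hd]
        have hhd : (if c ∈ ['a', 'e', 'i', 'o', 'u'] then PySem.Chars.upperChar c
                    else if w = [] then PySem.Chars.upperChar c
                    else PySem.Chars.lowerChar c) = tfc c t.head? := by
          rw [tfc, if_neg hc]
          by_cases hv : c ∈ ['a', 'e', 'i', 'o', 'u']
          · simp [hv]
          · by_cases hw' : w = []
            · rcases hw.mp hw' with h | h <;> simp [hv, hw', h]
            · have hnb : ¬ (t.head? = none ∨ t.head? = some ' ') := fun h => hw' (hw.mpr h)
              rw [not_or] at hnb
              simp [hv, hw', hnb.1, hnb.2]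
        have ih' := ih
        rw [hsp, List.flatMap_cons] at ih'
        rw [show mySplit (c :: t) = (c :: w) :: ws from by simp [mySplit, hc, hsp]]
        rw [List.flatMap_cons]
        simp only [wordTf, gspec, hhd]
        simp only [List.cons_append, List.append_assoc] at ih' ⊢
        rw [ih']

theorem manglerLoop_eq (s : String) : manglerLoop s = gspec s.toList ++ [' '] := by
  rw [manglerLoop]
  simp only [splitOn_eq]
  have hstep : ∀ (acc : List Char) (w : List Char), w ∈ mySplit s.toList →
      ((PySem.List.enumerate w 0).foldl (fun acc2 p =>
          if p.2 ∈ ['a', 'e', 'i', 'o', 'u'] then acc2 ++ [PySem.Chars.upperChar p.2]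
          else if p.1 = (w.length : Int) - 1 then acc2 ++ [PySem.Chars.upperChar p.2]
          else acc2 ++ [PySem.Chars.lowerChar p.2]) acc) ++ [' ']
        = acc ++ (wordTf w ++ [' ']) := by
    intro acc w _
    rw [innerFold_eq w 0 ((w.length : Int) - 1) acc]
    rw [show ((w.length : Int) - 1) = 0 + (w.length : Int) - 1 by omega, wordA_eq_wordTf w 0]
    simp
  rw [PySem.List.foldl_congr_mem _ _ (fun acc w => acc ++ (wordTf w ++ [' '])) _ hstep]
  rw [PySem.List.foldl_append_eq_flatMap]
  rw [flatMap_mySplit_eq]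
  rfl

theorem altFold_eq (s : String) :
    (PySem.List.enumerate s.toList 0).foldl (fun acc p =>
        if p.2 = ' ' then acc ++ [p.2]
        else if p.2 ∈ ['a', 'e', 'i', 'o', 'u'] then acc ++ [PySem.Chars.upperChar p.2]
        else if p.1 = (s.toList.length : Int) - 1 ∨ PySem.List.pyGet? s.toList (p.1 + 1) = some ' '
          then acc ++ [PySem.Chars.upperChar p.2]
        else acc ++ [PySem.Chars.lowerChar p.2]) [] = gspec s.toList := by
  suffices h : ∀ (suf pre : List Char) (acc : List Char),
      (PySem.List.enumerate suf (pre.length : Int)).foldl (fun acc p =>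
        if p.2 = ' ' then acc ++ [p.2]
        else if p.2 ∈ ['a', 'e', 'i', 'o', 'u'] then acc ++ [PySem.Chars.upperChar p.2]
        else if p.1 = ((pre ++ suf).length : Int) - 1 ∨
            PySem.List.pyGet? (pre ++ suf) (p.1 + 1) = some ' '
          then acc ++ [PySem.Chars.upperChar p.2]
        else acc ++ [PySem.Chars.lowerChar p.2]) acc = acc ++ gspec suf by
    have := h s.toList [] []
    simpa using this
  intro suf
  induction suf with
  | nil => intro pre acc; simp [PySem.List.enumerate_nil, gspec]
  | cons c rest ih =>
    intro pre acc
    rw [PySem.List.enumerate_cons, List.foldl_cons]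
    have hnext : PySem.List.pyGet? (pre ++ c :: rest) ((pre.length : Int) + 1) = rest.head? := by
      rw [show ((pre.length : Int) + 1) = ((pre.length + 1 : Nat) : Int) by push_cast; ring]
      rw [PySem.List.pyGet?_natCast]
      rw [List.getElem?_append_right (by omega)]
      simp [List.head?_eq_getElem?]
    have hlast : ((pre.length : Int) = ((pre ++ c :: rest).length : Int) - 1) ↔ rest = [] := by
      have hl : ((pre ++ c :: rest).length : Int) = (pre.length : Int) + (rest.length : Int) + 1 := by
        push_cast [List.length_append, List.length_cons]; ring
      rw [hl, List.eq_nil_iff_length_eq_zero]; omega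
    have hbound : ((pre.length : Int) = ((pre ++ c :: rest).length : Int) - 1 ∨
        PySem.List.pyGet? (pre ++ c :: rest) ((pre.length : Int) + 1) = some ' ')
        ↔ (rest.head? = none ∨ rest.head? = some ' ') := by
      rw [hnext, hlast, ← List.head?_eq_none_iff]
    have htail : ∀ acc', (PySem.List.enumerate rest ((pre.length : Int) + 1)).foldl (fun acc p =>
        if p.2 = ' ' then acc ++ [p.2]
        else if p.2 ∈ ['a', 'e', 'i', 'o', 'u'] then acc ++ [PySem.Chars.upperChar p.2]
        else if p.1 = ((pre ++ c :: rest).length : Int) - 1 ∨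
            PySem.List.pyGet? (pre ++ c :: rest) (p.1 + 1) = some ' '
          then acc ++ [PySem.Chars.upperChar p.2]
        else acc ++ [PySem.Chars.lowerChar p.2]) acc' = acc' ++ gspec rest := by
      intro acc'
      have := ih (pre ++ [c]) acc'
      simpa [List.append_assoc] using this
    simp only
    rw [gspec]
    by_cases hsp : c = ' '
    · subst hsp
      rw [if_pos rfl, htail]
      simp [tfc]
    · rw [if_neg hsp]
      by_cases hv : c ∈ ['a', 'e', 'i', 'o', 'u']
      · rw [if_pos hv, htail]
        simp [tfc, hsp, hv]
      · rw [if_neg hv]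
        by_cases hb : rest.head? = none ∨ rest.head? = some ' '
        · rw [if_pos (hbound.mpr hb), htail]
          rcases hb with h | h <;> simp [tfc, hsp, hv, h]
        · rw [if_neg (fun h => hb (hbound.mp h)), htail]
          rw [not_or] at hb
          have : tfc c rest.head? = PySem.Chars.lowerChar c := by
            simp [tfc, hsp, hv, hb.1, hb.2]
          simp [this]

-- ===== VERDICT (by name: the statement is the Claim_ definition above) =====
theorem mangler_spec : Claim_equal_mangler := by
  intro s _
  show mangler s = mangler_alt s
  rw [mangler, mangler_alt]
  simp only [manglerLoop_eq, PySem.List.slice_to_neg_one, List.dropLast_concat]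
  rw [altFold_eq]
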